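-- pv_equiv track=rewrite | github.com/JeshmithaD/OIL_SPILL_DETECTION_AQUASENTINAL | backend/services/ais_service.py | _vessel_type
-- ===== SOURCE A (Python) =====
-- def _vessel_type(type_code):
--     """Convert AIS vessel type code to human-readable string."""
--     type_code = int(type_code) if type_code else 0
--     type_map = {
--         range(20, 30): 'Wing In Ground',
--         range(30, 40): 'Fishing',
--         range(40, 50): 'High Speed Craft',
--         range(50, 60): 'Special Craft',
--         range(60, 70): 'Passenger',
--         range(70, 80): 'Cargo',
--         range(80, 90): 'Tanker',
--         range(90, 100): 'Other',
--     }
--     for r, name in type_map.items():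
--         if type_code in r:
--             return name
--     return 'Unknown'
-- ===== SOURCE B (Python) =====
-- def _vessel_type(type_code):
--     """Convert AIS vessel type code to human-readable string."""
--     type_code = int(type_code) if type_code else 0
--     labels = {
--         2: 'Wing In Ground',
--         3: 'Fishing',
--         4: 'High Speed Craft',
--         5: 'Special Craft',
--         6: 'Passenger',
--         7: 'Cargo',
--         8: 'Tanker',
--         9: 'Other',
--     }
--     return labels.get(type_code // 10, 'Unknown')
-- ===== Notes on version B (the rewrite author's own statement) =====
-- stated objective: simpler
-- what changed: Replaced the eight range-keyed dict entries scanned by a loop with one floor-division (type_code // 10) that computes the decade and a single dict lookup keyed by the tens digit; the loop and all membership tests are gone.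
import Mathlib
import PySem

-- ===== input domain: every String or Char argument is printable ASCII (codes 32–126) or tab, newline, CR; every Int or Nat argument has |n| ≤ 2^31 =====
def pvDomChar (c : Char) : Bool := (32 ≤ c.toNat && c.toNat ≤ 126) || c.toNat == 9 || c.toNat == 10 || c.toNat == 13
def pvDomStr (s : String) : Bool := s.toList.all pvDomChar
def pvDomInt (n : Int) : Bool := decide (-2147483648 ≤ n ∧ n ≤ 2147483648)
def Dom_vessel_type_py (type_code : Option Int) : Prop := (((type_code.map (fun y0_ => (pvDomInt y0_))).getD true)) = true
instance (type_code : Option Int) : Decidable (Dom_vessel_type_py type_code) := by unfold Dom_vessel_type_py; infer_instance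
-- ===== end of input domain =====

-- B replaces A's loop over eight range-keyed dict entries with one floor division and a single tens-digit dict lookup (simpler).


-- ===== PORT A =====
-- for r, name in type_map.items(): if type_code in r: return name; return 'Unknown'
def vtScan (c : Int) : List (List Int × String) → String
  | [] => "Unknown"
  | (r, name) :: rest => if c ∈ r then name else vtScan c rest

def vessel_type_py (type_code : Option Int) : String :=
  -- type_code = int(type_code) if type_code else 0  (None and 0 are falsy)
  let c : Int := match type_code with
    | none => 0
    | some v => if v ≠ 0 then v else 0
  let typeMap : List (List Int × String) :=
    [(PySem.List.pyRange 20 30 1, "Wing In Ground"),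
     (PySem.List.pyRange 30 40 1, "Fishing"),
     (PySem.List.pyRange 40 50 1, "High Speed Craft"),
     (PySem.List.pyRange 50 60 1, "Special Craft"),
     (PySem.List.pyRange 60 70 1, "Passenger"),
     (PySem.List.pyRange 70 80 1, "Cargo"),
     (PySem.List.pyRange 80 90 1, "Tanker"),
     (PySem.List.pyRange 90 100 1, "Other")]
  vtScan c typeMap

-- ===== PORT B =====
def vessel_type_py_alt (type_code : Option Int) : String :=
  let c : Int := match type_code with
    | none => 0
    | some v => if v ≠ 0 then v else 0
  let labels : PySem.Dict Int String := PySem.Dict.ofList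
    [(2, "Wing In Ground"), (3, "Fishing"), (4, "High Speed Craft"),
     (5, "Special Craft"), (6, "Passenger"), (7, "Cargo"),
     (8, "Tanker"), (9, "Other")]
  labels.getD (PySem.Int.floordiv c 10) "Unknown"

-- ===== PRECONDITION & SPEC =====
def Spec_vessel_type_py (type_code : Option Int) (out : String) : Prop := out = vessel_type_py_alt type_code
instance (type_code : Option Int) (out : String) : Decidable (Spec_vessel_type_py type_code out) := by unfold Spec_vessel_type_py; infer_instance

-- ===== CLAIM (what is proved, stated in full; the proofs are below) =====
def Claim_equal_vessel_type_py : Prop := ∀ (type_code : Option Int), Dom_vessel_type_py type_code → Spec_vessel_type_py type_code (vessel_type_py type_code)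

-- ===== LEMMAS AND PROOFS =====
theorem vt_core (c : Int) :
    vtScan c
      [(PySem.List.pyRange 20 30 1, "Wing In Ground"),
       (PySem.List.pyRange 30 40 1, "Fishing"),
       (PySem.List.pyRange 40 50 1, "High Speed Craft"),
       (PySem.List.pyRange 50 60 1, "Special Craft"),
       (PySem.List.pyRange 60 70 1, "Passenger"),
       (PySem.List.pyRange 70 80 1, "Cargo"),
       (PySem.List.pyRange 80 90 1, "Tanker"),
       (PySem.List.pyRange 90 100 1, "Other")] =
    (PySem.Dict.ofList
      [((2 : Int), "Wing In Ground"), (3, "Fishing"), (4, "High Speed Craft"),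
       (5, "Special Craft"), (6, "Passenger"), (7, "Cargo"),
       (8, "Tanker"), (9, "Other")]).getD (PySem.Int.floordiv c 10) "Unknown" := by
  have hf : PySem.Int.floordiv c 10 = c / 10 := PySem.Int.floordiv_eq_ediv_of_pos (by norm_num)
  have hD : (PySem.Dict.ofList
      [((2 : Int), "Wing In Ground"), (3, "Fishing"), (4, "High Speed Craft"),
       (5, "Special Craft"), (6, "Passenger"), (7, "Cargo"),
       (8, "Tanker"), (9, "Other")] : PySem.Dict Int String) = PySem.Dict.mk
      [((2 : Int), "Wing In Ground"), (3, "Fishing"), (4, "High Speed Craft"),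
       (5, "Special Craft"), (6, "Passenger"), (7, "Cargo"),
       (8, "Tanker"), (9, "Other")] := by decide
  rw [hD]
  simp only [vtScan, PySem.List.mem_pyRange_one, hf, PySem.Dict.getD, PySem.Dict.ofList,
    PySem.Dict.get?_mk_cons, PySem.Dict.get?]
  split_ifs with h1 h2 h3 h4 h5 h6 h7 h8
  · have hq : c / 10 = 2 := by omega
    simp [hq]
  · have hq : c / 10 = 3 := by omega
    simp [hq]
  · have hq : c / 10 = 4 := by omega
    simp [hq]
  · have hq : c / 10 = 5 := by omega
    simp [hq]
  · have hq : c / 10 = 6 := by omega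
    simp [hq]
  · have hq : c / 10 = 7 := by omega
    simp [hq]
  · have hq : c / 10 = 8 := by omega
    simp [hq]
  · have hq : c / 10 = 9 := by omega
    simp [hq]
  · have n2 : c / 10 ≠ 2 := by omega
    have n3 : c / 10 ≠ 3 := by omega
    have n4 : c / 10 ≠ 4 := by omega
    have n5 : c / 10 ≠ 5 := by omega
    have n6 : c / 10 ≠ 6 := by omega
    have n7 : c / 10 ≠ 7 := by omega
    have n8 : c / 10 ≠ 8 := by omega
    have n9 : c / 10 ≠ 9 := by omega
    simp [Ne.symm n2, Ne.symm n3, Ne.symm n4, Ne.symm n5,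
          Ne.symm n6, Ne.symm n7, Ne.symm n8, Ne.symm n9]

theorem vessel_type_py_spec : Claim_equal_vessel_type_py := by
  intro type_code _
  unfold Spec_vessel_type_py vessel_type_py vessel_type_py_alt
  cases type_code <;> exact vt_core _
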